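-- pv_equiv track=rewrite | github.com/Cassiexyq/Program-Exercise | 笔试/网易/零食.py | dp
-- ===== SOURCE A (Python) =====
-- def dp(m,n,item_sum):
--     if len(m) == 0:
--         return 1
--     elif n == 0:
--         return 1
--     elif item_sum < n:
--         return 2**len(m)
--     else:
--         item = m[0]
--         if item < n:
--             if item_sum-item < n:
--                 return 2 ** len(m[1:])
--             else:
--                 return dp(m[1:],n-item, item_sum-item) + dp(m[1:],n,item_sum)
--         else:
--             return 1
-- ===== SOURCE B (Python) =====
-- def dp(m, n, item_sum):
--     # Level-order evaluation: merge equal remaining-threshold states in a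
--     # counter instead of exploring the call tree branch by branch.
--     if len(m) == 0 or n == 0:
--         return 1
--     if item_sum < n:
--         return 2 ** len(m)
--     d = item_sum - n  # invariant: item_sum - n never changes in A's recursion
--     result = 0
--     active = {n: 1}
--     for i, x in enumerate(m):
--         tail = len(m) - i - 1
--         nxt = {}
--         for k, c in active.items():
--             if x < k:
--                 if x > d:
--                     result += c * 2 ** tail
--                 else:
--                     nxt[k - x] = nxt.get(k - x, 0) + c
--                     nxt[k] = nxt.get(k, 0) + c
--             else:
--                 result += c
--         active = nxt
--     return result + sum(active.values())
-- ===== Notes on version B (the rewrite author's own statement) =====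
-- stated objective: alternative
-- what changed: Replaces A's take/skip branching recursion by a single left-to-right sweep that keeps a counter dict of remaining-threshold states (exploiting that item_sum - n is invariant through A's recursion), merging equal states instead of exploring the call tree branch by branch.
import Mathlib
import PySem

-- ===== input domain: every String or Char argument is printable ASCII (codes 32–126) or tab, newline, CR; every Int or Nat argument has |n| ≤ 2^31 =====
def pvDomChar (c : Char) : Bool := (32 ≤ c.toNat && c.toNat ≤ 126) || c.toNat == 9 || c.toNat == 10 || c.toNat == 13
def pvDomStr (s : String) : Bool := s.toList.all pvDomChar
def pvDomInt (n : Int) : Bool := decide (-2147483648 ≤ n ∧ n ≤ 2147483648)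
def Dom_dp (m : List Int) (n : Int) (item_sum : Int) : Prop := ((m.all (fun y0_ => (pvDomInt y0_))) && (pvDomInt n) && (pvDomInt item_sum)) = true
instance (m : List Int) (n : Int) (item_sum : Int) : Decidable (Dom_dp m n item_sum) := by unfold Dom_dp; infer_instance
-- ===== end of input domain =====

-- B replaces A's exponential branching recursion by a level-order sweep that merges
-- equal remaining-threshold states in a counter dict.

-- ===== PORT A =====
def dp : List Int → Int → Int → Int
  | [], _, _ => 1
  | item :: rest, n, item_sum =>
    if n = 0 then 1
    else if item_sum < n then 2 ^ (rest.length + 1)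
    else if item < n then
      if item_sum - item < n then 2 ^ rest.length
      else dp rest (n - item) (item_sum - item) + dp rest n item_sum
    else 1

-- ===== PORT B =====
-- inner loop body: one state (k, c) of the counter, x the current item,
-- dd = item_sum - n (constant), tail = number of items after x
def dpAltStep (x dd : Int) (tail : Nat) (acc : Int × PySem.Dict Int Int) (p : Int × Int) :
    Int × PySem.Dict Int Int :=
  if x < p.1 then
    if x > dd then (acc.1 + p.2 * 2 ^ tail, acc.2)
    else (acc.1, (acc.2.modify (p.1 - x) 0 (· + p.2)).modify p.1 0 (· + p.2))
  else (acc.1 + p.2, acc.2)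

-- the 'for i, x in enumerate(m)' loop, as recursion on the remaining items
def dpAltLoop (dd : Int) : List Int → Int × PySem.Dict Int Int → Int
  | [], acc => acc.1 + acc.2.values.sum
  | x :: rs, acc => dpAltLoop dd rs (acc.2.items.foldl (dpAltStep x dd rs.length) (acc.1, PySem.Dict.empty))

def dp_alt (m : List Int) (n : Int) (item_sum : Int) : Int :=
  if m.length = 0 ∨ n = 0 then 1
  else if item_sum < n then 2 ^ m.length
  else dpAltLoop (item_sum - n) m (0, PySem.Dict.empty.insert n 1)

-- ===== PRECONDITION & SPEC =====
def Spec_dp (m : List Int) (n : Int) (item_sum : Int) (out : Int) : Prop := out = dp_alt m n item_sum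
instance (m : List Int) (n : Int) (item_sum : Int) (out : Int) : Decidable (Spec_dp m n item_sum out) := by unfold Spec_dp; infer_instance

-- ===== CLAIM (what is proved, stated in full; the proofs are below) =====
def Claim_equal_dp : Prop := ∀ (m : List Int) (n : Int) (item_sum : Int), Dom_dp m n item_sum → Spec_dp m n item_sum (dp m n item_sum)

-- ===== LEMMAS AND PROOFS =====

-- weighted sum of a counter dict under a value function f
def dictSum (d : PySem.Dict Int Int) (f : Int → Int) : Int :=
  (d.keys.map (fun k => d.getD k 0 * f k)).sum

lemma sum_map_update (k e : Int) (g h : Int → Int) :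
    ∀ (ks : List Int), ks.Nodup → k ∈ ks → (∀ j ∈ ks, j ≠ k → h j = g j) → h k = g k + e →
    (ks.map h).sum = (ks.map g).sum + e := by
  intro ks
  induction ks with
  | nil => intro _ hm; cases hm
  | cons a ks ih =>
    intro hnd hm hagree hk
    rcases List.mem_cons.mp hm with rfl | hm'
    · have : ks.map h = ks.map g := by
        apply List.map_congr_left
        intro j hj
        refine hagree j (List.mem_cons_of_mem _ hj) ?_
        intro hjk
        exact absurd (hjk ▸ hj) (List.nodup_cons.mp hnd).1
      simp [this, hk]; ring
    · have ha : h a = g a := by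
        refine hagree a (List.mem_cons_self) ?_
        intro hak
        exact absurd (hak ▸ hm') (List.nodup_cons.mp hnd).1
      have := ih (List.nodup_cons.mp hnd).2 hm'
        (fun j hj hjk => hagree j (List.mem_cons_of_mem _ hj) hjk) hk
      simp [ha, this]; ring

lemma mem_keys_modify (d : PySem.Dict Int Int) (k c j : Int)
    (hj : j ∈ (d.modify k 0 (· + c)).keys) : j = k ∨ j ∈ d.keys := by
  rw [PySem.Dict.keys_modify] at hj
  exact (PySem.Dict.mem_keys_insert d _ _ _).mp hj

lemma nodup_keys_modify (d : PySem.Dict Int Int) (k c : Int) (hnd : d.keys.Nodup) :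
    (d.modify k 0 (· + c)).keys.Nodup := by
  rw [PySem.Dict.keys_modify]
  by_cases hc : d.contains k
  · rw [PySem.Dict.keys_insert_of_contains d _ hc]; exact hnd
  · rw [PySem.Dict.keys_insert_of_not_contains d _ (by simpa using hc)]
    simp [List.nodup_append, hnd]
    intro a ha hak
    have := (PySem.Dict.contains_iff_mem_keys d k).mpr (hak ▸ ha)
    simp [this] at hc

lemma dictSum_modify (d : PySem.Dict Int Int) (hnd : d.keys.Nodup) (k c : Int) (f : Int → Int) :
    dictSum (d.modify k 0 (· + c)) f = dictSum d f + c * f k := by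
  unfold dictSum
  by_cases hc : d.contains k
  · have hkeys : (d.modify k 0 (· + c)).keys = d.keys := by
      rw [PySem.Dict.keys_modify, PySem.Dict.keys_insert_of_contains d _ hc]
    rw [hkeys]
    apply sum_map_update k (c * f k)
    · exact hnd
    · exact (PySem.Dict.contains_iff_mem_keys d k).mp hc
    · intro j _ hjk
      rw [PySem.Dict.getD_modify]
      simp [hjk]
    · rw [PySem.Dict.getD_modify]
      simp; ring
  · have hc' : d.contains k = false := by simpa using hc
    have hkeys : (d.modify k 0 (· + c)).keys = d.keys ++ [k] := by
      rw [PySem.Dict.keys_modify, PySem.Dict.keys_insert_of_not_contains d _ hc']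
    rw [hkeys, List.map_append, List.sum_append]
    have h1 : d.keys.map (fun j => (d.modify k 0 (· + c)).getD j 0 * f j)
        = d.keys.map (fun j => d.getD j 0 * f j) := by
      apply List.map_congr_left
      intro j hj
      have hjk : j ≠ k := by
        intro h
        have := (PySem.Dict.contains_iff_mem_keys d k).mpr (h ▸ hj)
        simp [hc'] at this
      rw [PySem.Dict.getD_modify]; simp [hjk]
    rw [h1]
    simp [PySem.Dict.getD_modify, PySem.Dict.getD_of_not_contains d 0 hc']

lemma fold_step (x dd : Int) (rest : List Int) (hdd : 0 ≤ dd) (items : List (Int × Int)) :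
    ∀ (res : Int) (nd : PySem.Dict Int Int), nd.keys.Nodup → (∀ j ∈ nd.keys, j ≠ 0) →
    (∀ p ∈ items, p.1 ≠ 0) →
    (items.foldl (dpAltStep x dd rest.length) (res, nd)).2.keys.Nodup ∧
    (∀ j ∈ (items.foldl (dpAltStep x dd rest.length) (res, nd)).2.keys, j ≠ 0) ∧
    (items.foldl (dpAltStep x dd rest.length) (res, nd)).1 +
      dictSum (items.foldl (dpAltStep x dd rest.length) (res, nd)).2 (fun k => dp rest k (k + dd)) =
    res + dictSum nd (fun k => dp rest k (k + dd)) +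
      (items.map (fun p => p.2 * dp (x :: rest) p.1 (p.1 + dd))).sum := by
  induction items with
  | nil => intro res nd h1 h2 _; exact ⟨h1, h2, by simp⟩
  | cons p items ih =>
    intro res nd hnd hkeys hitems
    obtain ⟨k, c⟩ := p
    have hk0 : k ≠ 0 := hitems (k, c) (List.mem_cons_self)
    have hrec : ∀ p' ∈ items, p'.1 ≠ 0 := fun p' hp' => hitems p' (List.mem_cons_of_mem _ hp')
    have hnotlt : ¬ (k + dd < k) := by omega
    by_cases hx : x < k
    · by_cases hgt : x > dd
      · -- dying leaf: contributes c * 2^|rest|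
        have hdp : dp (x :: rest) k (k + dd) = 2 ^ rest.length := by
          simp [dp, hk0, hnotlt, hx]
          omega
        have hstep : dpAltStep x dd rest.length (res, nd) (k, c) = (res + c * 2 ^ rest.length, nd) := by
          simp [dpAltStep, hx, hgt]
        rw [List.foldl_cons, hstep]
        obtain ⟨i1, i2, i3⟩ := ih (res + c * 2 ^ rest.length) nd hnd hkeys hrec
        refine ⟨i1, i2, ?_⟩
        rw [i3]
        simp [hdp]; ring
      · -- branch: split into states k - x and k
        have hxle : x ≤ dd := by omega
        have hdp : dp (x :: rest) k (k + dd)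
            = dp rest (k - x) (k - x + dd) + dp rest k (k + dd) := by
          have h4 : ¬ (k + dd - x < k) := by omega
          simp [dp, hk0, hnotlt, hx, h4]
          ring_nf
        set nd1 := nd.modify (k - x) 0 (· + c) with hnd1
        set nd2 := nd1.modify k 0 (· + c) with hnd2
        have hstep : dpAltStep x dd rest.length (res, nd) (k, c) = (res, nd2) := by
          simp [dpAltStep, hx, hgt, hnd1, hnd2]
        have hnd1nd : nd1.keys.Nodup := nodup_keys_modify nd (k - x) c hnd
        have hnd2nd : nd2.keys.Nodup := nodup_keys_modify nd1 k c hnd1nd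
        have hkeys2 : ∀ j ∈ nd2.keys, j ≠ 0 := by
          intro j hj
          rcases mem_keys_modify nd1 k c j hj with rfl | hj1
          · exact hk0
          · rcases mem_keys_modify nd (k - x) c j hj1 with rfl | hj2
            · omega
            · exact hkeys j hj2
        rw [List.foldl_cons, hstep]
        obtain ⟨i1, i2, i3⟩ := ih res nd2 hnd2nd hkeys2 hrec
        refine ⟨i1, i2, ?_⟩
        rw [i3]
        have hs2 : dictSum nd2 (fun k' => dp rest k' (k' + dd))
            = dictSum nd (fun k' => dp rest k' (k' + dd))
              + c * dp rest (k - x) (k - x + dd) + c * dp rest k (k + dd) := by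
          rw [hnd2, dictSum_modify nd1 hnd1nd, hnd1, dictSum_modify nd hnd]
        rw [hs2]
        simp [hdp]; ring
    · -- item too big: contributes c * 1
      have hdp : dp (x :: rest) k (k + dd) = 1 := by
        simp [dp, hk0, hnotlt, hx]
      have hstep : dpAltStep x dd rest.length (res, nd) (k, c) = (res + c, nd) := by
        simp [dpAltStep, hx]
      rw [List.foldl_cons, hstep]
      obtain ⟨i1, i2, i3⟩ := ih (res + c) nd hnd hkeys hrec
      refine ⟨i1, i2, ?_⟩
      rw [i3]
      simp [hdp]; ring

lemma loop_spec (dd : Int) (hdd : 0 ≤ dd) :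
    ∀ (m : List Int) (res : Int) (d : PySem.Dict Int Int), d.keys.Nodup →
    (∀ j ∈ d.keys, j ≠ 0) →
    dpAltLoop dd m (res, d) = res + dictSum d (fun k => dp m k (k + dd)) := by
  intro m
  induction m with
  | nil =>
    intro res d hnd _
    have hv : d.values = d.keys.map (fun k => d.getD k 0) :=
      PySem.Dict.values_eq_map_keys d hnd 0
    simp [dpAltLoop, dictSum, dp, hv]
  | cons x rs ih =>
    intro res d hnd hkeys
    have hitems : ∀ p ∈ d.items, p.1 ≠ 0 := by
      intro p hp
      exact hkeys p.1 (PySem.Dict.mem_keys_of_mem_items d hp)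
    obtain ⟨i1, i2, i3⟩ := fold_step x dd rs hdd d.items res PySem.Dict.empty
      (PySem.Dict.nodup_keys_empty) (by simp [PySem.Dict.keys_empty]) hitems
    have hitemsum : (d.items.map (fun p => p.2 * dp (x :: rs) p.1 (p.1 + dd))).sum
        = dictSum d (fun k => dp (x :: rs) k (k + dd)) := by
      rw [PySem.Dict.items_eq_map_keys d hnd 0]
      unfold dictSum
      rw [List.map_map]
      rfl
    set acc := d.items.foldl (dpAltStep x dd rs.length) (res, PySem.Dict.empty) with hacc
    have : dpAltLoop dd (x :: rs) (res, d) = dpAltLoop dd rs acc := by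
      simp [dpAltLoop, hacc]
    rw [this]
    have hpair : acc = (acc.1, acc.2) := rfl
    rw [hpair, ih acc.1 acc.2 i1 i2, i3, ← hitemsum]
    simp [dictSum, PySem.Dict.keys_empty]

-- ===== VERDICT (by name: the statement is the Claim_ definition above) =====
theorem dp_spec : Claim_equal_dp := by
  intro m n item_sum _
  unfold Spec_dp dp_alt
  match m with
  | [] => simp [dp]
  | a :: l =>
    by_cases hn : n = 0
    · simp [dp, hn]
    · by_cases hs : item_sum < n
      · simp [dp, hn, hs]
      · have hdd : 0 ≤ item_sum - n := by omega
        have hkeys : (PySem.Dict.empty.insert n (1 : Int)).keys = [n] := by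
          rw [PySem.Dict.keys_insert_of_not_contains _ _ (PySem.Dict.contains_empty n)]
          simp [PySem.Dict.keys_empty]
        have := loop_spec (item_sum - n) hdd (a :: l) 0 (PySem.Dict.empty.insert n 1)
          (by rw [hkeys]; simp) (by rw [hkeys]; simpa using hn)
        have hcond : ¬ ((a :: l).length = 0 ∨ n = 0) := by simp [hn]
        rw [if_neg hcond, if_neg hs, this]
        simp [dictSum, hkeys, PySem.Dict.getD_insert_self]
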